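-- pv_equiv track=rewrite | github.com/timurhamzin/wordle_telegram_bot | backup/wds_by_regex.py | process_attempts
-- ===== SOURCE A (Python) =====
-- from typing import Tuple
--
-- alphabet = 'abcdefghijklmnopqrstuvwxyz'
--
-- def process_attempts(attempts) -> Tuple[str, set, str]:
--     """
--
--     :param attempts: e.g. 'ura?tE' where `a` is present in pos other than 3,
--         `E` is present in pos 5
--     :return: present, missing, found, where
--         present e.g. 'a2s34p5'
--         missing  e.g. set('noneofthisletterswasfound')
--         found e.g. 's1'
--     """
--     to_present, to_missing, to_found = [[], [], []]
--     for attempt in attempts: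
--         pos = 0
--         for i, symbol in enumerate(attempt, 1):
--             next_symbol = ''
--             if i < len(attempt):
--                 next_symbol = attempt[i]
--             grey = symbol in alphabet
--             yellow = grey and next_symbol == '?'
--             grey = grey and not yellow
--             green = not (grey or yellow) and (symbol in alphabet.upper())
--             if any((grey, yellow, green)):
--                 pos += 1
--             if grey:
--                 to_missing.append(symbol)
--             elif yellow:
--                 to_present.append(f'{symbol}{pos}')
--             elif green:
--                 to_found.append(f'{symbol.lower()}{pos}')
--     return ''.join(to_present), set(to_missing), ''.join(to_found)
-- ===== SOURCE B (Python) =====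
-- import re
--
-- _TOKEN = re.compile(r'[A-Za-z]\??')
--
-- def process_attempts(attempts):
--     present, missing, found = [], [], []
--     for attempt in attempts:
--         for pos, tok in enumerate(_TOKEN.findall(attempt), 1):
--             if tok[0].isupper():
--                 found.append(tok[0].lower() + str(pos))
--             elif len(tok) == 2:
--                 present.append(tok[0] + str(pos))
--             else:
--                 missing.append(tok[0])
--     return ''.join(present), set(missing), ''.join(found)
-- ===== Notes on version B (the rewrite author's own statement) =====
-- stated objective: idiomatic
-- what changed: A scans every character with an index-based one-character lookahead, computes grey/yellow/green boolean flags and a conditionally incremented position counter; B first tokenizes each attempt with the regex [A-Za-z]\?? (a letter with an optional trailing '?') and then classifies the token list with enumerate, so the lookahead, the flags and the manual counter disappear.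
import Mathlib
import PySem

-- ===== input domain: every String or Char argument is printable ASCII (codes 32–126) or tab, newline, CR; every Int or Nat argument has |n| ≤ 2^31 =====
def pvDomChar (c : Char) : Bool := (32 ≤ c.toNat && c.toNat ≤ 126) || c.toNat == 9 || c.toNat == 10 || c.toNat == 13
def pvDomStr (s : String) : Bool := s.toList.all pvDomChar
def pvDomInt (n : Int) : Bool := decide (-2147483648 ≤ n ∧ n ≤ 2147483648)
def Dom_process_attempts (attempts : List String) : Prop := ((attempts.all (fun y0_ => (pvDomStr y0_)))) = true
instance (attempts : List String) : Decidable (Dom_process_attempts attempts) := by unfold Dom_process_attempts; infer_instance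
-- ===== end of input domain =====

-- B first tokenizes each attempt with the regex [A-Za-z]\?? and then classifies the
-- token list by its first character, replacing A's per-character flag/lookahead scan;
-- objective: idiomatic (same cost).

-- ===== PORT A =====
def pvAbc : List Char := "abcdefghijklmnopqrstuvwxyz".toList
def pvAbcU : List Char := PySem.Chars.upper pvAbc   -- alphabet.upper()

-- inner 'for i, symbol in enumerate(attempt, 1)' loop of A, recursion over the enumerated pairs
def paLoop (cs : List Char) : List (Int × Char) → Int → List String → List String → List String →
    Int × List String × List String × List String
  | [], pos, pres, miss, fnd => (pos, pres, miss, fnd)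
  | (i, symbol) :: rest, pos, pres, miss, fnd =>
    -- 'next_symbol = attempt[i]' is guarded by 'i < len(attempt)', so pyGet? is always some here
    let next_symbol : String :=
      if i < (cs.length : Int) then
        (match PySem.List.pyGet? cs i with | some ch => String.ofList [ch] | none => "")
      else ""
    let grey0 := pvAbc.contains symbol
    let yellow := grey0 && (next_symbol == "?")
    let grey := grey0 && !yellow
    let green := !(grey || yellow) && pvAbcU.contains symbol
    let pos' : Int := if grey || yellow || green then pos + 1 else pos
    if grey then paLoop cs rest pos' pres (miss ++ [String.ofList [symbol]]) fnd
    else if yellow then paLoop cs rest pos' (pres ++ [String.ofList [symbol] ++ PySem.Int.toStr pos']) miss fnd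
    else if green then paLoop cs rest pos' pres miss (fnd ++ [String.ofList [PySem.Chars.lowerChar symbol] ++ PySem.Int.toStr pos'])
    else paLoop cs rest pos' pres miss fnd

def process_attempts (attempts : List String) : String × List String × String :=
  let r := attempts.foldl (fun acc attempt =>
      let cs := attempt.toList
      let s := paLoop cs (PySem.List.enumerate cs 1) 0 acc.1 acc.2.1 acc.2.2
      (s.2.1, s.2.2.1, s.2.2.2)) ([], [], [])
  (PySem.Str.join "" r.1, PySem.Set.ofList r.2.1, PySem.Str.join "" r.2.2)

-- ===== PORT B =====
-- re.findall(r'[A-Za-z]\??', attempt): hand port of the regex matcher, exact — a match is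
-- one ASCII letter (the class [A-Za-z]) together with an optional immediately following '?'
def pbLetter (c : Char) : Bool := ('A' ≤ c && c ≤ 'Z') || ('a' ≤ c && c ≤ 'z')

def pbFindall : List Char → List String
  | [] => []
  | [c] => if pbLetter c then [String.ofList [c]] else []
  | c :: d :: rest =>
    if pbLetter c then
      if d = '?' then String.ofList [c, '?'] :: pbFindall rest
      else String.ofList [c] :: pbFindall (d :: rest)
    else pbFindall (d :: rest)

-- body of B's 'for pos, tok in enumerate(findall(...), 1)' loop; findall tokens are
-- nonempty, so the [] case of tok[0] is unreachable
def pbStep (acc : List String × List String × List String) (p : Int × String) :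
    List String × List String × List String :=
  match p.2.toList with
  | [] => acc
  | c :: rest =>
    if PySem.Chars.isupper c then
      (acc.1, acc.2.1, acc.2.2 ++ [String.ofList [PySem.Chars.lowerChar c] ++ PySem.Int.toStr p.1])
    else if (c :: rest).length = 2 then
      (acc.1 ++ [String.ofList [c] ++ PySem.Int.toStr p.1], acc.2.1, acc.2.2)
    else
      (acc.1, acc.2.1 ++ [String.ofList [c]], acc.2.2)

def process_attempts_alt (attempts : List String) : String × List String × String :=
  let r := attempts.foldl (fun acc attempt =>
      (PySem.List.enumerate (pbFindall attempt.toList) 1).foldl pbStep acc) ([], [], [])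
  (PySem.Str.join "" r.1, PySem.Set.ofList r.2.1, PySem.Str.join "" r.2.2)

-- ===== PRECONDITION & SPEC =====
def Spec_process_attempts (attempts : List String) (out : String × List String × String) : Prop := out = process_attempts_alt attempts
instance (attempts : List String) (out : String × List String × String) : Decidable (Spec_process_attempts attempts out) := by unfold Spec_process_attempts; infer_instance

-- ===== CLAIM (what is proved, stated in full; the proofs are below) =====
def Claim_equal_process_attempts : Prop := ∀ (attempts : List String), Dom_process_attempts attempts → Spec_process_attempts attempts (process_attempts attempts)

-- ===== LEMMAS AND PROOFS =====

theorem char_bounds {a c : Char} (h : a ≤ c) : a.val.toNat ≤ c.val.toNat :=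
  UInt32.le_iff_toNat_le.mp (Char.le_def.mp h)

theorem pb_letter_mem {c : Char} (h : pbLetter c = true) : c ∈ pvAbc ∨ c ∈ pvAbcU := by
  have hc : Char.ofNat c.toNat = c := Char.ofNat_toNat c
  simp only [pbLetter, Bool.or_eq_true, Bool.and_eq_true, decide_eq_true_eq] at h
  rcases h with ⟨h1, h2⟩ | ⟨h1, h2⟩
  · right
    have b1 := char_bounds h1; have b2 := char_bounds h2
    simp at b1 b2
    rw [← hc]
    interval_cases h : c.toNat <;> decide
  · left
    have b1 := char_bounds h1; have b2 := char_bounds h2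
    simp at b1 b2
    rw [← hc]
    interval_cases h : c.toNat <;> decide

theorem pb_lower_letter {c : Char} (h : c ∈ pvAbc) :
    pbLetter c = true ∧ PySem.Chars.isupper c = false := by
  have : pvAbc.all (fun c => pbLetter c && !PySem.Chars.isupper c) = true := by decide
  have := List.all_eq_true.mp this c h
  simp at this; exact this

theorem pb_upper_letter {c : Char} (h : c ∈ pvAbcU) :
    pbLetter c = true ∧ PySem.Chars.isupper c = true := by
  have : pvAbcU.all (fun c => pbLetter c && PySem.Chars.isupper c) = true := by decide
  have := List.all_eq_true.mp this c h
  simp at this; exact this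

theorem pb_nonletter {c : Char} (h1 : c ∉ pvAbc) (h2 : c ∉ pvAbcU) : pbLetter c = false := by
  cases hb : pbLetter c
  · rfl
  · rcases pb_letter_mem hb with h | h
    · exact absurd h h1
    · exact absurd h h2

theorem pa_pb_key (cs : List Char) (n : Nat) :
    ∀ (t : List Char) (k : Nat) (pos : Int) (pres miss fnd : List String),
      t.length ≤ n → cs.drop k = t →
      (paLoop cs (PySem.List.enumerate t ((k : Int)+1)) pos pres miss fnd).2 =
        (PySem.List.enumerate (pbFindall t) (pos+1)).foldl pbStep (pres, miss, fnd) := by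
  induction n with
  | zero =>
    intro t k pos pres miss fnd hlen hdrop
    have ht : t = [] := List.eq_nil_of_length_eq_zero (Nat.le_zero.mp hlen)
    subst ht
    simp [paLoop, pbFindall]
  | succ n ih =>
    intro t k pos pres miss fnd hlen hdrop
    cases t with
    | nil => simp [paLoop, pbFindall]
    | cons c t' =>
      have hdrop' : cs.drop (k+1) = t' := by
        have h1 : (cs.drop k).drop 1 = cs.drop (k+1) := by rw [List.drop_drop]
        rw [← h1, hdrop]; rfl
      have hlen' : t'.length ≤ n := by simp at hlen; omega
      rw [PySem.List.enumerate_cons]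
      by_cases hm : c ∈ pvAbc
      · -- lowercase letter
        obtain ⟨hlet, hup⟩ := pb_lower_letter hm
        cases t' with
        | nil =>
          have hge : ¬ (k+1 < cs.length) := by
            have := List.drop_eq_nil_iff.mp hdrop'
            omega
          have hgeI : ¬ ((k : Int) + 1 < (cs.length : Int)) := by exact_mod_cast hge
          simp [paLoop, pbFindall, pbStep, hm, hlet, hup, hgeI]
        | cons d t'' =>
          have hget : cs[k+1]? = some d := by rw [← List.head?_drop, hdrop']; rfl
          have hlt : ((k : Int) + 1) < (cs.length : Int) := by
            have := (List.getElem?_eq_some_iff.mp hget).1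
            exact_mod_cast this
          have hv : PySem.List.pyGet? cs ((k : Int) + 1) = some d := by
            have hcast : ((k : Int) + 1) = ((k + 1 : Nat) : Int) := by push_cast; ring
            rw [hcast, PySem.List.pyGet?_natCast]
            exact hget
          by_cases hd : d = '?'
          · -- letter + '?' is one token in B; A takes the yellow branch, then skips the '?'
            subst hd
            have hdrop'' : cs.drop (k+2) = t'' := by
              have h1 : (cs.drop (k+1)).drop 1 = cs.drop (k+2) := by rw [List.drop_drop]
              rw [← h1, hdrop']; rfl
            have hlen'' : t''.length ≤ n := by simp at hlen; omega
            have hq : String.ofList ['?'] = "?" := by rfl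
            have hq2 : '?' ∉ pvAbc := by decide
            have hq3 : '?' ∉ pvAbcU := by decide
            rw [PySem.List.enumerate_cons]
            have h := ih t'' (k+2) (pos+1)
              (pres ++ [String.ofList [c] ++ PySem.Int.toStr (pos+1)]) miss fnd hlen'' hdrop''
            simpa [paLoop, pbFindall, pbStep, hm, hlet, hup, hlt, hv, hq, hq2, hq3,
              Nat.cast_add, add_assoc] using h
          · have hne : ¬ (String.ofList [d] = "?") := by
              intro h
              apply hd
              have := congrArg String.toList h
              simpa using this
            have h := ih (d :: t'') (k+1) (pos+1)
              pres (miss ++ [String.ofList [c]]) fnd hlen' hdrop'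
            simpa [paLoop, pbFindall, pbStep, hm, hlet, hup, hlt, hv, hne, hd,
              Nat.cast_add, add_assoc] using h
      · by_cases hcu : c ∈ pvAbcU
        · -- uppercase letter: green in A; B's token may also swallow a following '?'
          obtain ⟨hlet, hup⟩ := pb_upper_letter hcu
          cases t' with
          | nil =>
            have hge : ¬ (k+1 < cs.length) := by
              have := List.drop_eq_nil_iff.mp hdrop'
              omega
            have hgeI : ¬ ((k : Int) + 1 < (cs.length : Int)) := by exact_mod_cast hge
            simp [paLoop, pbFindall, pbStep, hm, hcu, hlet, hup, hgeI]
          | cons d t'' =>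
            have hget : cs[k+1]? = some d := by rw [← List.head?_drop, hdrop']; rfl
            have hlt : ((k : Int) + 1) < (cs.length : Int) := by
              have := (List.getElem?_eq_some_iff.mp hget).1
              exact_mod_cast this
            have hv : PySem.List.pyGet? cs ((k : Int) + 1) = some d := by
              have hcast : ((k : Int) + 1) = ((k + 1 : Nat) : Int) := by push_cast; ring
              rw [hcast, PySem.List.pyGet?_natCast]
              exact hget
            by_cases hd : d = '?'
            · subst hd
              have hdrop'' : cs.drop (k+2) = t'' := by
                have h1 : (cs.drop (k+1)).drop 1 = cs.drop (k+2) := by rw [List.drop_drop]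
                rw [← h1, hdrop']; rfl
              have hlen'' : t''.length ≤ n := by simp at hlen; omega
              have hq2 : '?' ∉ pvAbc := by decide
              have hq3 : '?' ∉ pvAbcU := by decide
              rw [PySem.List.enumerate_cons]
              have h := ih t'' (k+2) (pos+1) pres miss
                (fnd ++ [String.ofList [PySem.Chars.lowerChar c] ++ PySem.Int.toStr (pos+1)]) hlen'' hdrop''
              simpa [paLoop, pbFindall, pbStep, hm, hcu, hlet, hup, hlt, hv, hq2, hq3,
                Nat.cast_add, add_assoc] using h
            · have h := ih (d :: t'') (k+1) (pos+1) pres miss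
                (fnd ++ [String.ofList [PySem.Chars.lowerChar c] ++ PySem.Int.toStr (pos+1)]) hlen' hdrop'
              simpa [paLoop, pbFindall, pbStep, hm, hcu, hlet, hup, hlt, hv, hd,
                Nat.cast_add, add_assoc] using h
        · -- not a letter: both sides skip it
          have hnl := pb_nonletter hm hcu
          cases t' with
          | nil =>
            have hge : ¬ (k+1 < cs.length) := by
              have := List.drop_eq_nil_iff.mp hdrop'
              omega
            have hgeI : ¬ ((k : Int) + 1 < (cs.length : Int)) := by exact_mod_cast hge
            simp [paLoop, pbFindall, hm, hcu, hnl, hgeI]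
          | cons d t'' =>
            have hget : cs[k+1]? = some d := by rw [← List.head?_drop, hdrop']; rfl
            have hlt : ((k : Int) + 1) < (cs.length : Int) := by
              have := (List.getElem?_eq_some_iff.mp hget).1
              exact_mod_cast this
            have hv : PySem.List.pyGet? cs ((k : Int) + 1) = some d := by
              have hcast : ((k : Int) + 1) = ((k + 1 : Nat) : Int) := by push_cast; ring
              rw [hcast, PySem.List.pyGet?_natCast]
              exact hget
            have h := ih (d :: t'') (k+1) pos pres miss fnd hlen' hdrop'
            simpa [paLoop, pbFindall, hm, hcu, hnl, hlt, hv,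
              Nat.cast_add, add_assoc] using h

theorem process_attempts_spec' (attempts : List String) :
    process_attempts attempts = process_attempts_alt attempts := by
  unfold process_attempts process_attempts_alt
  have hf : (fun (acc : List String × List String × List String) (attempt : String) =>
      let cs := attempt.toList
      let s := paLoop cs (PySem.List.enumerate cs 1) 0 acc.1 acc.2.1 acc.2.2
      (s.2.1, s.2.2.1, s.2.2.2)) =
      (fun (acc : List String × List String × List String) (attempt : String) =>
      (PySem.List.enumerate (pbFindall attempt.toList) 1).foldl pbStep acc) := by
    funext acc attempt
    have h := pa_pb_key attempt.toList attempt.toList.length attempt.toList 0 0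
      acc.1 acc.2.1 acc.2.2 le_rfl (by simp)
    norm_num at h
    simp only [h]
  rw [hf]

-- ===== VERDICT (by name: the statement is the Claim_ definition above) =====
theorem process_attempts_spec : Claim_equal_process_attempts := by
  intro attempts _
  unfold Spec_process_attempts
  exact process_attempts_spec' attempts
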